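-- pv_equiv track=rewrite | github.com/uewekenuewe/Advent-Of-Code | 2025/day02/day02.py | asdf2
-- ===== SOURCE A (Python) =====
-- import math
--
-- def asdf2(s):
--     s = str(s)
--     for i in range(math.ceil(len(s)/2)):
--         if s.count(s[0:i])*len(s[0:i]) == len(s):
--             return True
--     if s[:math.floor(len(s)/2)] != s[math.floor(len(s)/2):]:
--         return False
--     return True
-- ===== SOURCE B (Python) =====
-- def asdf2(s):
--     s = str(s)
--     return s in (s + s)[1:-1]
-- ===== Notes on version B (the rewrite author's own statement) =====
-- stated objective: faster
-- what changed: Replaces A's loop over candidate prefix lengths with count() calls (plus a final half-split comparison) by the classic single rotation test: s is a repeated prefix iff s occurs in (s+s)[1:-1].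
import Mathlib
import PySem

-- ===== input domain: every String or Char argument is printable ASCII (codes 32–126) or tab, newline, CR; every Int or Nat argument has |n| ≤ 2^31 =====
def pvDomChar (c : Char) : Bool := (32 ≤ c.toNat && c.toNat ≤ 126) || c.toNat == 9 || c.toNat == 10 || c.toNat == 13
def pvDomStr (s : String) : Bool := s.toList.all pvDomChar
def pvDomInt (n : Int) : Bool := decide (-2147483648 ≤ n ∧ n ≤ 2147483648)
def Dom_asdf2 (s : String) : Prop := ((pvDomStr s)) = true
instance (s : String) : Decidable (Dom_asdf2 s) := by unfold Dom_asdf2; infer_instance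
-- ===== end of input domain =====

-- B replaces A's quadratic prefix-count loop by the classic linear rotation test: s in (s+s)[1:-1].

-- ===== PORT A =====
-- for i in range(math.ceil(len(s)/2)): if s.count(s[0:i])*len(s[0:i]) == len(s): return True
-- then: return s[:len(s)//2] == s[len(s)//2:]   (math.ceil(n/2) = (n+1)//2 and math.floor(n/2) = n//2 exactly, n ≥ 0)
def asdf2 (s : String) : Bool :=
  if (PySem.List.pyRange 0 (((s.toList.length : Int) + 1) / 2)).any (fun i =>
      PySem.Chars.count s.toList (PySem.Chars.slice s.toList (some 0) (some i))
        * (PySem.Chars.slice s.toList (some 0) (some i)).length == s.toList.length)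
  then true
  else if !(PySem.Chars.slice s.toList none (some ((s.toList.length : Int) / 2))
      == PySem.Chars.slice s.toList (some ((s.toList.length : Int) / 2)) none)
  then false
  else true

-- ===== PORT B =====
-- return s in (s + s)[1:-1]
def asdf2_alt (s : String) : Bool :=
  PySem.Chars.isIn s.toList (PySem.Chars.slice (s.toList ++ s.toList) (some 1) (some (-1)))

-- ===== PRECONDITION & SPEC =====
def Spec_asdf2 (s : String) (out : Bool) : Prop := out = asdf2_alt s
instance (s : String) (out : Bool) : Decidable (Spec_asdf2 s out) := by unfold Spec_asdf2; infer_instance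

-- ===== CLAIM (what is proved, stated in full; the proofs are below) =====
def Claim_equal_asdf2 : Prop := ∀ (s : String), Dom_asdf2 s → Spec_asdf2 s (asdf2 s)

-- ===== LEMMAS AND PROOFS =====

-- `tile k p` = p repeated k times; `Power cs` = cs is some word repeated at least twice
def tile (k : Nat) (p : List Char) : List Char := (List.replicate k p).flatten

def Power (cs : List Char) : Prop := ∃ k p, 2 ≤ k ∧ cs = tile k p

theorem tile_zero (p : List Char) : tile 0 p = [] := rfl

theorem tile_succ (k : Nat) (p : List Char) : tile (k+1) p = p ++ tile k p := by
  simp [tile, List.replicate_succ]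

theorem length_tile (k : Nat) (p : List Char) : (tile k p).length = k * p.length := by
  induction k with
  | zero => simp [tile]
  | succ k ih => simp [tile_succ, ih]; ring

theorem tile_add (k m : Nat) (p : List Char) : tile (k + m) p = tile k p ++ tile m p := by
  induction k with
  | zero => simp [tile]
  | succ k ih => rw [Nat.succ_add, tile_succ, ih, tile_succ]; simp

-- the Python slice (s+s)[1:-1]
theorem tile_nil (k : Nat) : tile k [] = [] := by simp [tile]

theorem tile_one (p : List Char) : tile 1 p = p := by simp [tile]

theorem slice_one_negone {α : Type} (xs : List α) :
    PySem.List.slice xs (some 1) (some (-1)) = (xs.dropLast).drop 1 := by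
  rcases xs with _ | ⟨a, t⟩
  · rfl
  · have h : ¬ ((t.length : Int) < 0) := by omega
    simp [PySem.List.slice, PySem.List.clampIdx, List.dropLast_eq_take, List.drop_take, h]

-- equation lemmas for str.count's greedy scanner
theorem go_zero (sub : List Char) (acc : Nat) (l : List Char) : PySem.Chars.count.go sub 0 l acc = acc := by
  rw [PySem.Chars.count.go]

theorem go_nil (sub : List Char) (acc fuel : Nat) : PySem.Chars.count.go sub fuel [] acc = acc := by
  cases fuel
  · rw [go_zero]
  · simp [PySem.Chars.count.go]

theorem go_cons (sub : List Char) (acc fuel : Nat) (h : Char) (t : List Char) :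
    PySem.Chars.count.go sub (fuel+1) (h :: t) acc =
      (if sub.isPrefixOf (h :: t) then PySem.Chars.count.go sub fuel ((h::t).drop sub.length) (acc+1)
       else PySem.Chars.count.go sub fuel t acc) := by
  rw [PySem.Chars.count.go]

-- the accumulator shifts out
theorem go_acc (sub : List Char) (fuel : Nat) : ∀ (l : List Char) (acc : Nat),
    PySem.Chars.count.go sub fuel l acc = acc + PySem.Chars.count.go sub fuel l 0 := by
  induction fuel with
  | zero => intro l acc; rw [go_zero, go_zero]; omega
  | succ fuel ih =>
    intro l acc
    rcases l with _ | ⟨h, t⟩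
    · rw [go_nil, go_nil]; omega
    · rw [go_cons, go_cons]
      split_ifs
      · rw [ih _ (acc+1), ih _ (0+1)]; omega
      · rw [ih t acc, ih t 0]

-- the middle (s+s)[1:-1] rewritten
theorem middle_eq (cs : List Char) (hne : cs ≠ []) :
    ((cs ++ cs).dropLast).drop 1 = cs.drop 1 ++ cs.dropLast := by
  rw [List.dropLast_append_of_ne_nil hne,
    List.drop_append_of_le_length (List.length_pos_of_ne_nil hne)]


-- greedy non-overlapping count: c*|sub| ≤ |l|, with equality exactly on tilings
theorem go_le_and_tile (sub : List Char) (hsub : sub ≠ []) :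
    ∀ (fuel : Nat) (l : List Char), l.length ≤ fuel →
      PySem.Chars.count.go sub fuel l 0 * sub.length ≤ l.length ∧
      (PySem.Chars.count.go sub fuel l 0 * sub.length = l.length →
        l = tile (PySem.Chars.count.go sub fuel l 0) sub) := by
  intro fuel
  induction fuel with
  | zero =>
    intro l hl
    have : l = [] := List.length_eq_zero_iff.mp (by omega)
    subst this
    simp [go_zero, tile]
  | succ fuel ih =>
    intro l hl
    rcases l with _ | ⟨h, t⟩
    · simp [go_nil, tile]
    · rw [go_cons]
      by_cases hpre : sub.isPrefixOf (h :: t) = true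
      · rw [if_pos hpre]
        have hp : sub <+: (h :: t) := List.isPrefixOf_iff_prefix.mp hpre
        have hsl : 0 < sub.length := List.length_pos_of_ne_nil hsub
        have hlen : sub.length ≤ (h :: t).length := hp.length_le
        have hdl : ((h :: t).drop sub.length).length = (h :: t).length - sub.length := by simp
        have hih := ih ((h :: t).drop sub.length) (by simp at hl ⊢; omega)
        rw [go_acc]
        have hexp : ∀ c : Nat, (0 + 1 + c) * sub.length = c * sub.length + sub.length := by
          intro c; ring
        refine ⟨?_, ?_⟩
        · rw [hexp]
          have h1 := hih.1
          omega
        · intro heq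
          rw [hexp] at heq
          have h1 := hih.1
          have hceq : PySem.Chars.count.go sub fuel ((h :: t).drop sub.length) 0 * sub.length
              = ((h :: t).drop sub.length).length := by omega
          have htile := hih.2 hceq
          have hrecon : sub ++ (h :: t).drop sub.length = h :: t :=
            List.prefix_iff_eq_append.mp hp
          rw [show 0 + 1 + PySem.Chars.count.go sub fuel ((h :: t).drop sub.length) 0
              = PySem.Chars.count.go sub fuel ((h :: t).drop sub.length) 0 + 1 by omega, tile_succ]
          conv_lhs => rw [← hrecon]
          rw [← htile]
      · rw [if_neg hpre]
        have hih := ih t (by simp at hl ⊢; omega)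
        have h1 := hih.1
        have hlt : t.length < (h :: t).length := by simp
        exact ⟨by omega, by intro heq; omega⟩


-- on an exact tiling the greedy count is the number of blocks
theorem go_tile (sub : List Char) (hsub : sub ≠ []) :
    ∀ (k fuel : Nat) (acc : Nat), k ≤ fuel →
      PySem.Chars.count.go sub fuel (tile k sub) acc = acc + k := by
  intro k
  induction k with
  | zero => intro fuel acc _; simp [tile, go_nil]
  | succ k ih =>
    intro fuel acc hk
    obtain ⟨f, rfl⟩ : ∃ f, fuel = f + 1 := ⟨fuel - 1, by omega⟩
    rcases sub with _ | ⟨c, cs⟩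
    · exact absurd rfl hsub
    · rw [tile_succ]
      have hpre : (c :: cs).isPrefixOf ((c :: cs) ++ tile k (c :: cs)) = true := by
        simp [List.isPrefixOf_iff_prefix]
      rw [show (c :: cs) ++ tile k (c :: cs) = c :: (cs ++ tile k (c :: cs)) by simp]
      rw [go_cons]
      rw [show c :: (cs ++ tile k (c :: cs)) = (c :: cs) ++ tile k (c :: cs) by simp] at *
      rw [hpre]
      simp only [if_true]
      rw [show ((c :: cs) ++ tile k (c :: cs)).drop (c :: cs).length = tile k (c :: cs) from List.drop_left (l₁ := c :: cs) (l₂ := tile k (c :: cs))]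
      rw [ih f (acc+1) (by omega)]
      omega


-- commuting words are powers of a common word
theorem comm_pow : ∀ (N : Nat) (p q : List Char), p.length + q.length ≤ N →
    p ++ q = q ++ p → ∃ w k m, p = tile k w ∧ q = tile m w := by
  intro N
  induction N with
  | zero =>
    intro p q hlen _
    have hp : p = [] := List.length_eq_zero_iff.mp (by omega)
    have hq : q = [] := List.length_eq_zero_iff.mp (by omega)
    exact ⟨[], 0, 0, by simp [hp, tile], by simp [hq, tile]⟩
  | succ N ih =>
    intro p q hlen hcomm
    rcases eq_or_ne p [] with hp | hp
    · exact ⟨q, 0, 1, by simp [hp, tile], by simp [tile]⟩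
    rcases eq_or_ne q [] with hq | hq
    · exact ⟨p, 1, 0, by simp [tile], by simp [hq, tile]⟩
    have step : ∀ a b : List Char, a ≠ [] → a.length ≤ b.length → a ++ b = b ++ a →
        a.length + b.length ≤ N + 1 → ∃ w k m, a = tile k w ∧ b = tile m w := by
      intro a b ha hab hc hN
      have htake : (a ++ b).take a.length = a := List.take_left (l₁ := a) (l₂ := b)
      have htake2 : (b ++ a).take a.length = b.take a.length :=
        List.take_append_of_le_length hab
      rw [hc, htake2] at htake
      have hpref : a = b.take a.length := htake.symm
      have hb : b = a ++ b.drop a.length := by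
        conv_lhs => rw [← List.take_append_drop a.length b, ← hpref]
      set b' := b.drop a.length with hb'
      have hc' : a ++ b' = b' ++ a := by
        have : a ++ (a ++ b') = (a ++ b') ++ a := by rw [← hb]; exact hc
        rw [List.append_assoc] at this
        exact List.append_cancel_left this
      have hal : 0 < a.length := List.length_pos_of_ne_nil ha
      have hbl : b'.length = b.length - a.length := by simp [hb']
      obtain ⟨w, k, m, hw1, hw2⟩ := ih a b' (by omega) hc'
      refine ⟨w, k, k + m, hw1, ?_⟩
      rw [hb, tile_add, ← hw1, ← hw2]
    rcases le_total p.length q.length with hle | hle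
    · exact step p q hp hle hcomm hlen
    · obtain ⟨w, k, m, hw1, hw2⟩ := step q p hq hle hcomm.symm (by omega)
      exact ⟨w, m, k, hw2, hw1⟩


-- A's body, over the underlying character list
theorem A_aux (cs : List Char) :
    (if (PySem.List.pyRange 0 (((cs.length : Int) + 1) / 2)).any (fun i =>
        PySem.Chars.count cs (PySem.Chars.slice cs (some 0) (some i))
          * (PySem.Chars.slice cs (some 0) (some i)).length == cs.length)
    then true
    else if !(PySem.Chars.slice cs none (some ((cs.length : Int) / 2))
        == PySem.Chars.slice cs (some ((cs.length : Int) / 2)) none)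
    then false
    else true) = true ↔ Power cs := by
  have hslice_to : PySem.Chars.slice cs none (some ((cs.length : Int) / 2))
      = cs.take (cs.length / 2) := by
    rw [PySem.Chars.slice_eq_listSlice, PySem.List.slice_to _ (by omega)]
    rw [show (((cs.length : Int)) / 2).toNat = cs.length / 2 by omega]
  have hslice_from : PySem.Chars.slice cs (some ((cs.length : Int) / 2)) none
      = cs.drop (cs.length / 2) := by
    rw [PySem.Chars.slice_eq_listSlice, PySem.List.slice_from _ (by omega)]
    rw [show (((cs.length : Int)) / 2).toNat = cs.length / 2 by omega]
  constructor
  · intro hA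
    by_cases hany : (PySem.List.pyRange 0 (((cs.length : Int) + 1) / 2)).any (fun i =>
        PySem.Chars.count cs (PySem.Chars.slice cs (some 0) (some i))
          * (PySem.Chars.slice cs (some 0) (some i)).length == cs.length) = true
    · obtain ⟨i, hi, hci⟩ := List.any_eq_true.mp hany
      rw [PySem.List.mem_pyRange_one] at hi
      have hij : i = ((i.toNat : Nat) : Int) := by omega
      set j := i.toNat with hj
      rw [hij] at hci
      have hslice : PySem.Chars.slice cs (some (0 : Int)) (some ((j : Nat) : Int))
          = cs.take j := by
        rw [PySem.Chars.slice_eq_listSlice, PySem.List.slice_toNat _ (by omega) (by omega)]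
        simp
      rw [hslice] at hci
      simp only [beq_iff_eq] at hci
      have hjlt : (2 : Nat) * j < cs.length + 1 := by omega
      rcases Nat.eq_zero_or_pos j with h0 | hj1
      · rw [h0] at hci
        simp [PySem.Chars.count] at hci
        have hnil : cs = [] := List.length_eq_zero_iff.mp (by omega)
        exact ⟨2, [], le_refl _, by rw [hnil, tile_nil]⟩
      · have hjn : 2 * j < cs.length := by omega
        have htlen : (cs.take j).length = j := by
          rw [List.length_take]; omega
        have htne : cs.take j ≠ [] := by
          intro h
          have := congrArg List.length h
          rw [htlen] at this
          simp at this
          omega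
        have hcount : PySem.Chars.count cs (cs.take j)
            = PySem.Chars.count.go (cs.take j) cs.length cs 0 := by
          simp [PySem.Chars.count, List.isEmpty_eq_false_iff.mpr htne]
        rw [hcount, htlen] at hci
        have hml := go_le_and_tile (cs.take j) htne cs.length cs (le_refl _)
        have htile := hml.2 (by rw [htlen]; exact hci)
        have hc2 : 2 ≤ PySem.Chars.count.go (cs.take j) cs.length cs 0 := by
          by_contra hc
          have hle : PySem.Chars.count.go (cs.take j) cs.length cs 0 * j ≤ 1 * j :=
            Nat.mul_le_mul_right _ (by omega)
          omega
        exact ⟨_, _, hc2, htile⟩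
    · rw [if_neg hany] at hA
      split_ifs at hA with hb
      rw [hslice_to, hslice_from] at hb
      simp only [Bool.not_eq_true', beq_eq_false_iff_ne, ne_eq, not_not] at hb
      refine ⟨2, cs.take (cs.length / 2), le_refl _, ?_⟩
      have h2 : tile 2 (cs.take (cs.length / 2))
          = cs.take (cs.length / 2) ++ cs.take (cs.length / 2) := by
        simp [tile]
      rw [h2]
      conv_lhs => rw [← List.take_append_drop (cs.length / 2) cs, ← hb]
  · rintro ⟨k, p, hk, hcseq⟩
    have hnlen : cs.length = k * p.length := by rw [hcseq, length_tile]
    rcases Nat.eq_zero_or_pos cs.length with hn0 | hnpos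
    · have hnil : cs = [] := List.length_eq_zero_iff.mp hn0
      rw [hnil]
      decide
    · have hp : p ≠ [] := by
        intro h
        rw [h, tile_nil] at hcseq
        rw [hcseq] at hnpos
        simp at hnpos
      have hd : 1 ≤ p.length := List.length_pos_of_ne_nil hp
      have hkd : 2 * p.length ≤ k * p.length := Nat.mul_le_mul_right _ hk
      have hsplit : cs = p ++ tile (k - 1) p := by
        rw [hcseq]
        conv_lhs => rw [show k = (k - 1) + 1 by omega]
        rw [tile_succ]
      by_cases hdn : 2 * p.length < cs.length
      · -- the loop hits at i = len(p)
        have hcond : (PySem.List.pyRange 0 (((cs.length : Int) + 1) / 2)).any (fun i =>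
            PySem.Chars.count cs (PySem.Chars.slice cs (some 0) (some i))
              * (PySem.Chars.slice cs (some 0) (some i)).length == cs.length) = true := by
          refine List.any_eq_true.mpr ⟨((p.length : Nat) : Int),
            PySem.List.mem_pyRange_one.mpr ⟨by omega, by omega⟩, ?_⟩
          have hslice : PySem.Chars.slice cs (some (0 : Int)) (some ((p.length : Nat) : Int))
              = cs.take p.length := by
            rw [PySem.Chars.slice_eq_listSlice, PySem.List.slice_toNat _ (by omega) (by omega)]
            simp
          rw [hslice]
          have htp : cs.take p.length = p := by
            rw [hsplit, List.take_left' rfl]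
          rw [htp]
          have hne : p.isEmpty = false := List.isEmpty_eq_false_iff.mpr hp
          have hcount : PySem.Chars.count cs p
              = PySem.Chars.count.go p cs.length cs 0 := by
            simp [PySem.Chars.count, hne]
          rw [hcount]
          rw [hcseq]
          rw [go_tile p hp k (tile k p).length 0
            (by rw [length_tile]; exact Nat.le_mul_of_pos_right k hd)]
          rw [length_tile]
          simp
        rw [if_pos hcond]
      · -- n = 2*len(p): the final half comparison succeeds
        have h2d : cs.length = 2 * p.length := by omega
        have hk2 : k = 2 := by
          have := hnlen
          rw [h2d] at this
          exact (Nat.eq_of_mul_eq_mul_right (by omega) this.symm)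
        have htile2 : cs = p ++ p := by
          rw [hcseq, hk2]
          simp [tile]
        have hhalf : cs.length / 2 = p.length := by omega
        have heq : cs.take (cs.length / 2) = cs.drop (cs.length / 2) := by
          rw [hhalf, htile2, List.take_left' rfl, List.drop_left' rfl]
        by_cases hany : (PySem.List.pyRange 0 (((cs.length : Int) + 1) / 2)).any (fun i =>
            PySem.Chars.count cs (PySem.Chars.slice cs (some 0) (some i))
              * (PySem.Chars.slice cs (some 0) (some i)).length == cs.length) = true
        · rw [if_pos hany]
        · rw [if_neg hany, hslice_to, hslice_from]
          simp [heq]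

theorem A_iff (s : String) : asdf2 s = true ↔ Power s.toList := by
  unfold asdf2
  exact A_aux s.toList

theorem mid_window (cs t1 : List Char) (n : Nat) (hn : n = cs.length) (hn1 : 1 ≤ n)
    (hb : t1.length + 1 ≤ n - 1) :
    ((cs.drop 1 ++ cs.dropLast).drop t1.length).take n
      = cs.drop (t1.length + 1) ++ cs.take (t1.length + 1) := by
  rw [List.drop_append_of_le_length (by simp; omega)]
  rw [List.drop_drop]
  rw [List.take_append]
  rw [show 1 + t1.length = t1.length + 1 by omega]
  congr 1
  · exact List.take_of_length_le (by simp; omega)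
  · rw [List.dropLast_eq_take, List.take_take]
    congr 1
    simp
    omega

theorem B_iff (s : String) : asdf2_alt s = true ↔ Power s.toList := by
  unfold asdf2_alt
  rw [PySem.Chars.slice_eq_listSlice, slice_one_negone, PySem.Chars.isIn_iff_infix]
  set cs := s.toList with hcs
  rcases eq_or_ne cs [] with hnil | hne
  · rw [hnil]
    constructor
    · intro _; exact ⟨2, [], le_refl _, by simp [tile]⟩
    · intro _; simp
  · rw [middle_eq cs hne]
    have hn1 : 1 ≤ cs.length := List.length_pos_of_ne_nil hne
    constructor
    · rintro ⟨t1, t2, hu⟩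
      set n := cs.length with hn
      have hlen : t1.length + (n + t2.length) = (n - 1) + (n - 1) := by
        have := congrArg List.length hu
        simpa using this
      have hrb : t1.length + 1 ≤ n - 1 := by omega
      have h1 : ((t1 ++ (cs ++ t2)).drop t1.length).take n = cs := by
        rw [List.drop_left, List.take_left' rfl]
      rw [List.append_assoc] at hu
      rw [hu] at h1
      rw [mid_window cs t1 n hn hn1 hrb] at h1
      set r := t1.length + 1 with hr
      have hpq : cs.take r ++ cs.drop r = cs.drop r ++ cs.take r := by
        rw [List.take_append_drop]; exact h1.symm
      obtain ⟨w, k, m, hw1, hw2⟩ := comm_pow ((cs.take r).length + (cs.drop r).length)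
        (cs.take r) (cs.drop r) (le_refl _) hpq
      have hkl : (cs.take r).length = r := by rw [List.length_take, ← hn]; omega
      have hml : (cs.drop r).length = n - r := by rw [List.length_drop, ← hn]
      have hk1 : 1 ≤ k := by
        rcases Nat.eq_zero_or_pos k with h0 | h
        · rw [h0, tile_zero] at hw1; rw [hw1] at hkl; simp at hkl
        · exact h
      have hm1 : 1 ≤ m := by
        rcases Nat.eq_zero_or_pos m with h0 | h
        · rw [h0, tile_zero] at hw2; rw [hw2] at hml; simp at hml; omega
        · exact h
      refine ⟨k + m, w, by omega, ?_⟩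
      rw [← List.take_append_drop r cs, hw1, hw2, tile_add]
    · rintro ⟨k, p, hk, hcseq⟩
      have hp : p ≠ [] := by
        intro h; rw [h, tile_nil] at hcseq; exact hne hcseq
      have hd : 1 ≤ p.length := List.length_pos_of_ne_nil hp
      have htk1 : tile (k-1) p ≠ [] := by
        intro h
        have hl := congrArg List.length h
        rw [length_tile] at hl
        simp only [List.length_nil] at hl
        rcases Nat.mul_eq_zero.mp hl with h' | h' <;> omega
      refine ⟨p.drop 1, (tile (k - 1) p).dropLast, ?_⟩
      have hsplit : tile k p = p ++ tile (k-1) p := by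
        conv_lhs => rw [show k = (k-1) + 1 by omega]
        rw [tile_succ]
      have hsplit2 : tile k p = tile (k-1) p ++ p := by
        conv_lhs => rw [show k = (k-1) + 1 by omega]
        rw [tile_add, tile_one]
      rw [hcseq]
      rw [show (tile k p).drop 1 = p.drop 1 ++ tile (k-1) p by
        rw [hsplit, List.drop_append_of_le_length (by omega)]]
      rw [show (tile k p).dropLast = p ++ (tile (k-1) p).dropLast by
        rw [hsplit, List.dropLast_append_of_ne_nil htk1]]
      rw [hsplit2]
      simp

-- ===== VERDICT (by name: the statement is the Claim_ definition above) =====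
theorem asdf2_spec : Claim_equal_asdf2 := by
  intro s _
  unfold Spec_asdf2
  have h := (A_iff s).trans (B_iff s).symm
  cases h1 : asdf2 s <;> cases h2 : asdf2_alt s <;> simp_all
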